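-- pv_equiv track=rewrite | github.com/Patchwork53/cs221stanford | state.py | structuredPerceptron
-- ===== SOURCE A (Python) =====
-- class TransportationProblem2(object):
--     def __init__(self, N, weights) -> None:
--         self.N = N
--         self.weights = weights
--
--     def startState(self):
--         return 1
--
--     def isEnd(self, state):
--         return state == self.N
--
--     def succAndCost(self, state):
--         result =[]
--
--         if state*2<=self.N:
--             result.append(('tram',state*2, self.weights['tram']))
--         if state+1<=self.N:
--             result.append(('walk',state+1, self.weights['walk']))
--
--         return result
--
-- def DP(problem):
--
--     #cache for each state which contains future_cost and path_to_end
--     #cache updated when recurse returns something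
--
--     cache = [None]*(problem.N+1)
--
--     def recurse(state):
--
--         if problem.isEnd(state):
--             #total_cost, travel to state with cost
--             return {'cost':0, 'path':[]}
--
--         if cache[state]!= None:
--             return cache[state]
--
--         best = {
--             'cost': float('+inf'),
--             'path' : None
--         }
--
--         for action, nextState, cost in problem.succAndCost(state):
--
--             nxt = recurse(nextState)
--
--             if nxt['cost']+cost < best['cost']:
--                 best['cost'] = nxt['cost']+cost
--                 best['path'] = [(action,str(nextState),str(cost))] + nxt['path']
--
--
--         cache[state] = best
--
--         return best
--
--     return recurse(1)
--
-- def predict(N, weights):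
--     problem = TransportationProblem2(N, weights)
--     history = DP(problem)['path']
--     return [action for action, state, cost in history]
--
-- def structuredPerceptron(examples):
--     weights = {'walk':0, 'tram':0}
--
--     for t in range(100):
--
--         for N,real_path in examples:
--
--             guess_path = predict(N,weights)
--             for action in real_path:
--                 weights[action]-=1
--             for action in guess_path:
--                 weights[action]+=1
--
--     return weights
-- ===== SOURCE B (Python) =====
-- def predict(N, weights):
--     # bottom-up DP over states N-1 .. 1: cheapest cost to reach N and the chosen move
--     best_cost = {N: 0}
--     best_action = {}
--     for offset in range(1, N):
--         s = N - offset
--         if 2 * s <= N: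
--             c = best_cost[2 * s] + weights['tram']
--             if s not in best_cost or c < best_cost[s]:
--                 best_cost[s] = c
--                 best_action[s] = ('tram', 2 * s)
--         c = best_cost[s + 1] + weights['walk']
--         if s not in best_cost or c < best_cost[s]:
--             best_cost[s] = c
--             best_action[s] = ('walk', s + 1)
--     path = []
--     s = 1
--     while s != N:
--         action, s = best_action[s]
--         path.append(action)
--     return path
--
-- def structuredPerceptron(examples):
--     weights = {'walk': 0, 'tram': 0}
--     for t in range(100):
--         for N, real_path in examples:
--             guess_path = predict(N, weights)
--             for action in real_path:
--                 weights[action] -= 1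
--             for action in guess_path:
--                 weights[action] += 1
--     return weights
-- ===== Notes on version B (the rewrite author's own statement) =====
-- stated objective: alternative
-- what changed: predict's memoized top-down recursion (DP with a cache and recursive path concatenation) is replaced by an explicit bottom-up table built from state N down to 1 plus a forward walk that reconstructs the action list; the 100-pass perceptron loop is unchanged.
import Mathlib
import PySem

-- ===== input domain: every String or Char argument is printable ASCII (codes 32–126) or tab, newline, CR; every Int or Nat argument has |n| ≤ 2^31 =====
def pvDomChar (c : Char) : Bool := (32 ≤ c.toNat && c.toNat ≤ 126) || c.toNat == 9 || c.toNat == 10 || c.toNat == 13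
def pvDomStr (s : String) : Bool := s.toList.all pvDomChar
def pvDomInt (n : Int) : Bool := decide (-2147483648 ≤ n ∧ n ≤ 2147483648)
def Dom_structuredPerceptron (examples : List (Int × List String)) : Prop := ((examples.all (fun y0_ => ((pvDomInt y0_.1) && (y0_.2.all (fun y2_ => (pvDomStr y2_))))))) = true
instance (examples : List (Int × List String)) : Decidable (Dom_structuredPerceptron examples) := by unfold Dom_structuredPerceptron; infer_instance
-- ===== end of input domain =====

-- B rewrites predict's memoized top-down recursion as a bottom-up table DP with forward path
-- reconstruction (objective: alternative decomposition, same cost); the 100-pass perceptron loop is kept.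

-- ===== PORT A =====

-- best['cost'] = float('+inf') is `none`; best['path'] = None is `none` (paired with the cost).
abbrev pvResA := Option Int × Option (List (String × String × String))

-- `x < best['cost']`: anything is < +inf.
def pvLtInf (x : Int) (b : Option Int) : Bool :=
  match b with
  | none => true
  | some c => decide (x < c)

-- the body of A's successor loop: update `best` from one (action, nextState, cost) and recurse's result
def pvStepA (best : pvResA) (action : String) (ns cost : Int) (nxt : pvResA) : pvResA :=
  match nxt with
  | (some c, some p) =>
      if pvLtInf (c + cost) best.1 then
        (some (c + cost), some ((action, PySem.Int.toStr ns, PySem.Int.toStr cost) :: p))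
      else best
  | _ => best

-- A's `recurse`, with the cache threaded through (Python's list cache, entries None until set,
-- transliterated as a dict keyed by state: presence = `cache[state] != None`); fuel only makes the
-- recursion structural — the Python recursion always terminates where it is called.
def pvRecA (N tram walk : Int) :
    Nat → Int → PySem.Dict Int pvResA → pvResA × PySem.Dict Int pvResA
  | 0, _, cache => ((none, none), cache)
  | f + 1, s, cache =>
    if s = N then ((some 0, some []), cache)
    else
      match PySem.Dict.get? cache s with
      | some r => (r, cache)
      | none =>
        -- succAndCost order: tram first, then walk
        let p1 := if s * 2 ≤ N then
            let r := pvRecA N tram walk f (s * 2) cache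
            (pvStepA (none, none) "tram" (s * 2) tram r.1, r.2)
          else ((none, none), cache)
        let p2 := if s + 1 ≤ N then
            let r := pvRecA N tram walk f (s + 1) p1.2
            (pvStepA p1.1 "walk" (s + 1) walk r.1, r.2)
          else p1
        (p2.1, PySem.Dict.insert p2.2 s p2.1)

-- A's predict: DP(problem)['path'], then keep the actions. The weights keys 'tram'/'walk' are
-- always present at every call site (getD 0 is never the default); a missing path (N ≤ 0, where
-- Python raises) yields [] — those inputs are outside Pre_.
def pvPredictA (N : Int) (weights : PySem.Dict String Int) : List String :=
  let tram := (PySem.Dict.get? weights "tram").getD 0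
  let walk := (PySem.Dict.get? weights "walk").getD 0
  match (pvRecA N tram walk (N.toNat + 1) 1 PySem.Dict.empty).1.2 with
  | some hist => hist.map (fun t => t.1)
  | none => []

def structuredPerceptron (examples : List (Int × List String)) : List (String × Int) :=
  let w0 : PySem.Dict String Int := PySem.Dict.ofList [("walk", 0), ("tram", 0)]
  ((PySem.List.pyRange 0 100 1).foldl (fun w _t =>
    examples.foldl (fun w ex =>
      let guess := pvPredictA ex.1 w
      let w := ex.2.foldl (fun w a => PySem.Dict.modify w a 0 (fun v => v - 1)) w
      guess.foldl (fun w a => PySem.Dict.modify w a 0 (fun v => v + 1)) w) w) w0).items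

-- ===== PORT B =====

-- one pass of B's table loop: state s = N - offset, try tram then walk with strict improvement
def pvStepB (N tram walk : Int)
    (st : PySem.Dict Int Int × PySem.Dict Int (String × Int)) (offset : Int) :
    PySem.Dict Int Int × PySem.Dict Int (String × Int) :=
  let s := N - offset
  let st1 := if 2 * s ≤ N then
      let c := (PySem.Dict.get? st.1 (2 * s)).getD 0 + tram  -- key 2*s is always present here
      match PySem.Dict.get? st.1 s with
      | none => (PySem.Dict.insert st.1 s c, PySem.Dict.insert st.2 s ("tram", 2 * s))
      | some b => if c < b then (PySem.Dict.insert st.1 s c, PySem.Dict.insert st.2 s ("tram", 2 * s))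
                  else st
    else st
  let c := (PySem.Dict.get? st1.1 (s + 1)).getD 0 + walk  -- key s+1 is always present here
  match PySem.Dict.get? st1.1 s with
  | none => (PySem.Dict.insert st1.1 s c, PySem.Dict.insert st1.2 s ("walk", s + 1))
  | some b => if c < b then (PySem.Dict.insert st1.1 s c, PySem.Dict.insert st1.2 s ("walk", s + 1))
              else st1

-- B's `while s != N` reconstruction walk; fuel N.toNat bounds the ≤ N-1 iterations; a missing
-- entry (N ≤ 0, where Python raises KeyError) stops with the path so far — outside Pre_.
def pvWalkB (ba : PySem.Dict Int (String × Int)) (N : Int) :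
    Nat → Int → List String → List String
  | 0, _, acc => acc
  | f + 1, s, acc =>
    if s = N then acc
    else
      match PySem.Dict.get? ba s with
      | none => acc
      | some (a, ns) => pvWalkB ba N f ns (acc ++ [a])

def pvPredictB (N : Int) (weights : PySem.Dict String Int) : List String :=
  let tram := (PySem.Dict.get? weights "tram").getD 0
  let walk := (PySem.Dict.get? weights "walk").getD 0
  let st := (PySem.List.pyRange 1 N 1).foldl (pvStepB N tram walk)
      (PySem.Dict.ofList [(N, 0)], PySem.Dict.empty)
  pvWalkB st.2 N N.toNat 1 []

def structuredPerceptron_alt (examples : List (Int × List String)) : List (String × Int) :=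
  let w0 : PySem.Dict String Int := PySem.Dict.ofList [("walk", 0), ("tram", 0)]
  ((PySem.List.pyRange 0 100 1).foldl (fun w _t =>
    examples.foldl (fun w ex =>
      let guess := pvPredictB ex.1 w
      let w := ex.2.foldl (fun w a => PySem.Dict.modify w a 0 (fun v => v - 1)) w
      guess.foldl (fun w a => PySem.Dict.modify w a 0 (fun v => v + 1)) w) w) w0).items

-- ===== PRECONDITION & SPEC =====

-- Pre_ excludes exactly the inputs where Python A raises: N ≤ 0 (DP leaves path None and
-- predict raises TypeError iterating it) and an action other than 'walk'/'tram' in a real_path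
-- (KeyError on the weights dict).
def Pre_structuredPerceptron (examples : List (Int × List String)) : Prop :=
  (examples.all (fun ex => decide (1 ≤ ex.1)
      && ex.2.all (fun a => a == "walk" || a == "tram"))) = true

instance (examples : List (Int × List String)) : Decidable (Pre_structuredPerceptron examples) := by
  unfold Pre_structuredPerceptron; infer_instance

def pvWitness_structuredPerceptron : (List (Int × List String)) :=
  [(4, ["walk", "tram"]), (2, ["walk"])]

def Spec_structuredPerceptron (examples : List (Int × List String)) (out : List (String × Int)) : Prop :=
  out = structuredPerceptron_alt examples
instance (examples : List (Int × List String)) (out : List (String × Int)) : Decidable (Spec_structuredPerceptron examples out) := by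
  unfold Spec_structuredPerceptron; infer_instance

-- ===== CLAIM (what is proved, stated in full; the proofs are below) =====
def Claim_equal_structuredPerceptron : Prop := ∀ (examples : List (Int × List String)), Dom_structuredPerceptron examples → Pre_structuredPerceptron examples → Spec_structuredPerceptron examples (structuredPerceptron examples)

-- ===== LEMMAS AND PROOFS =====

-- The common value both DPs compute: for 1 ≤ s < N, (cost to reach N from s, the chosen path as
-- (action, nextState, edge weight) triples); tram is tried first and walk replaces it only on
-- strict improvement, exactly as in both programs.
def pvSpec (N tram walk s : Int) : Int × List (String × Int × Int) :=
  if h : 1 ≤ s ∧ s < N then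
    let w := pvSpec N tram walk (s + 1)
    if s * 2 ≤ N then
      let t := pvSpec N tram walk (s * 2)
      if w.1 + walk < t.1 + tram then (w.1 + walk, ("walk", s + 1, walk) :: w.2)
      else (t.1 + tram, ("tram", s * 2, tram) :: t.2)
    else (w.1 + walk, ("walk", s + 1, walk) :: w.2)
  else (0, [])
termination_by (N - s).toNat
decreasing_by all_goals omega

theorem pvSpec_base (N tram walk s : Int) (h : ¬ (1 ≤ s ∧ s < N)) :
    pvSpec N tram walk s = (0, []) := by
  rw [pvSpec, dif_neg h]

theorem pvSpec_step (N tram walk s : Int) (h1 : 1 ≤ s) (h2 : s < N) :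
    pvSpec N tram walk s =
      (if s * 2 ≤ N then
        (if (pvSpec N tram walk (s + 1)).1 + walk < (pvSpec N tram walk (s * 2)).1 + tram then
          ((pvSpec N tram walk (s + 1)).1 + walk, ("walk", s + 1, walk) :: (pvSpec N tram walk (s + 1)).2)
        else
          ((pvSpec N tram walk (s * 2)).1 + tram, ("tram", s * 2, tram) :: (pvSpec N tram walk (s * 2)).2))
      else
        ((pvSpec N tram walk (s + 1)).1 + walk, ("walk", s + 1, walk) :: (pvSpec N tram walk (s + 1)).2)) := by
  rw [pvSpec, dif_pos ⟨h1, h2⟩]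

-- the chosen head of the path chains to the path of the next state
theorem pvSpec_chain (N tram walk s : Int) (h1 : 1 ≤ s) (h2 : s < N) :
    ∃ a ns c, (pvSpec N tram walk s).2 = (a, ns, c) :: (pvSpec N tram walk ns).2 ∧
      s < ns ∧ ns ≤ N := by
  rw [pvSpec_step N tram walk s h1 h2]
  by_cases hT : s * 2 ≤ N
  · by_cases hW : (pvSpec N tram walk (s + 1)).1 + walk < (pvSpec N tram walk (s * 2)).1 + tram
    · exact ⟨"walk", s + 1, walk, by simp [hT, hW], by omega, by omega⟩
    · exact ⟨"tram", s * 2, tram, by simp [hT, hW], by omega, by omega⟩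
  · exact ⟨"walk", s + 1, walk, by simp [hT], by omega, by omega⟩

-- ========== A side ==========

def pvMkA (N tram walk s : Int) : pvResA :=
  (some (pvSpec N tram walk s).1,
   some ((pvSpec N tram walk s).2.map (fun e => (e.1, PySem.Int.toStr e.2.1, PySem.Int.toStr e.2.2))))

def pvGoodA (N tram walk : Int) (cache : PySem.Dict Int pvResA) : Prop :=
  ∀ k r, PySem.Dict.get? cache k = some r → r = pvMkA N tram walk k

theorem pvRecA_correct (N tram walk : Int) :
    ∀ (f : Nat) (s : Int) (cache : PySem.Dict Int pvResA),
      1 ≤ s → s ≤ N → (N - s).toNat < f → pvGoodA N tram walk cache →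
      (pvRecA N tram walk f s cache).1 = pvMkA N tram walk s ∧
      pvGoodA N tram walk (pvRecA N tram walk f s cache).2 := by
  intro f
  induction f with
  | zero => intro s cache h1 h2 hf hg; omega
  | succ f ih =>
    intro s cache h1 h2 hf hg
    by_cases hsN : s = N
    · constructor
      · simp only [pvRecA, if_pos hsN]
        simp [pvMkA, pvSpec_base N tram walk s (by omega)]
      · simpa [pvRecA, if_pos hsN] using hg
    · have hsN' : s < N := by omega
      rcases hget : PySem.Dict.get? cache s with _ | r
      · -- cache miss
        simp only [pvRecA, if_neg hsN, hget]
        by_cases h2s : s * 2 ≤ N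
        · obtain ⟨e1, g1⟩ := ih (s * 2) cache (by omega) h2s (by omega) hg
          obtain ⟨e2, g2⟩ := ih (s + 1) _ (by omega) (by omega) (by omega) g1
          simp only [if_pos h2s, if_pos (show s + 1 ≤ N by omega), e1, e2]
          have hb : pvStepA
              (pvStepA (none, none) "tram" (s * 2) tram (pvMkA N tram walk (s * 2)))
              "walk" (s + 1) walk (pvMkA N tram walk (s + 1)) = pvMkA N tram walk s := by
            simp only [pvMkA, pvStepA, pvLtInf]
            rw [pvSpec_step N tram walk s h1 hsN', if_pos h2s]
            by_cases hW : (pvSpec N tram walk (s + 1)).1 + walk < (pvSpec N tram walk (s * 2)).1 + tram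
            · simp [hW]
            · simp [hW]
          rw [hb]
          refine ⟨rfl, ?_⟩
          intro k r hkr
          rw [PySem.Dict.get?_insert] at hkr
          by_cases hks : k = s
          · simp [hks] at hkr; subst hks; rw [← hkr]
          · rw [if_neg hks] at hkr; exact g2 k r hkr
        · obtain ⟨e2, g2⟩ := ih (s + 1) cache (by omega) (by omega) (by omega) hg
          simp only [if_neg h2s, if_pos (show s + 1 ≤ N by omega), e2]
          have hb : pvStepA (none, none) "walk" (s + 1) walk (pvMkA N tram walk (s + 1)) =
              pvMkA N tram walk s := by
            simp only [pvMkA, pvStepA, pvLtInf]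
            rw [pvSpec_step N tram walk s h1 hsN', if_neg h2s]
            simp
          rw [hb]
          refine ⟨rfl, ?_⟩
          intro k r hkr
          rw [PySem.Dict.get?_insert] at hkr
          by_cases hks : k = s
          · simp [hks] at hkr; subst hks; rw [← hkr]
          · rw [if_neg hks] at hkr; exact g2 k r hkr
      · -- cache hit
        constructor
        · simp only [pvRecA, if_neg hsN, hget]
          exact hg s r hget
        · simpa [pvRecA, if_neg hsN, hget] using hg

-- ========== B side ==========

def pvActOf (l : List (String × Int × Int)) : Option (String × Int) :=
  match l with
  | [] => none
  | (a, ns, _) :: _ => some (a, ns)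

def pvInvB (N tram walk k : Int) (st : PySem.Dict Int Int × PySem.Dict Int (String × Int)) : Prop :=
  (∀ x, PySem.Dict.get? st.1 x =
      if x = N then some 0
      else if N - k ≤ x ∧ x < N then some (pvSpec N tram walk x).1 else none) ∧
  (∀ x, PySem.Dict.get? st.2 x =
      if N - k ≤ x ∧ x < N then pvActOf (pvSpec N tram walk x).2 else none)

theorem pvInvB_cost (N tram walk k : Int) (st : PySem.Dict Int Int × PySem.Dict Int (String × Int))
    (inv : pvInvB N tram walk k st) (x : Int) (hx1 : N - k ≤ x) (hx2 : x ≤ N) :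
    PySem.Dict.get? st.1 x = some (pvSpec N tram walk x).1 := by
  rw [inv.1 x]
  by_cases hxN : x = N
  · rw [if_pos hxN, hxN, pvSpec_base N tram walk N (by omega)]
  · rw [if_neg hxN, if_pos ⟨hx1, by omega⟩]

theorem pvStepB_preserve (N tram walk k : Int)
    (st : PySem.Dict Int Int × PySem.Dict Int (String × Int))
    (hk : 0 ≤ k) (hk2 : k + 1 ≤ N - 1) (inv : pvInvB N tram walk k st) :
    pvInvB N tram walk (k + 1) (pvStepB N tram walk st (k + 1)) := by
  have hs1 : 1 ≤ N - (k + 1) := by omega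
  have hgs : PySem.Dict.get? st.1 (N - (k + 1)) = none := by
    rw [inv.1]
    rw [if_neg (by omega), if_neg (by omega)]
  have hres : (∀ x, PySem.Dict.get? (pvStepB N tram walk st (k + 1)).1 x =
        if x = N - (k + 1) then some (pvSpec N tram walk (N - (k + 1))).1
        else PySem.Dict.get? st.1 x) ∧
      (∀ x, PySem.Dict.get? (pvStepB N tram walk st (k + 1)).2 x =
        if x = N - (k + 1) then pvActOf (pvSpec N tram walk (N - (k + 1))).2
        else PySem.Dict.get? st.2 x) := by
    have hw : PySem.Dict.get? st.1 (N - (k + 1) + 1) =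
        some (pvSpec N tram walk (N - (k + 1) + 1)).1 :=
      pvInvB_cost N tram walk k st inv _ (by omega) (by omega)
    have hspec := pvSpec_step N tram walk (N - (k + 1)) hs1 (by omega)
    by_cases h2s : 2 * (N - (k + 1)) ≤ N
    · have ht : PySem.Dict.get? st.1 (2 * (N - (k + 1))) =
          some (pvSpec N tram walk (2 * (N - (k + 1)))).1 :=
        pvInvB_cost N tram walk k st inv _ (by omega) (by omega)
      have h2s' : (N - (k + 1)) * 2 ≤ N := by omega
      rw [if_pos h2s'] at hspec
      have hmul : (N - (k + 1)) * 2 = 2 * (N - (k + 1)) := by ring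
      rw [hmul] at hspec
      have hne : ¬ (N - (k + 1) + 1 = N - (k + 1)) := by omega
      simp only [pvStepB, if_pos h2s, ht, hgs, Option.getD_some, PySem.Dict.get?_insert,
        if_neg hne, hw]
      by_cases hW : (pvSpec N tram walk (N - (k + 1) + 1)).1 + walk <
          (pvSpec N tram walk (2 * (N - (k + 1)))).1 + tram
      · rw [if_pos hW] at hspec
        constructor
        · intro x
          by_cases hx : x = N - (k + 1) <;>
            simp [hx, hspec, hW, PySem.Dict.get?_insert]
        · intro x
          by_cases hx : x = N - (k + 1) <;>
            simp [hx, hspec, hW, pvActOf, PySem.Dict.get?_insert]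
      · rw [if_neg hW] at hspec
        constructor
        · intro x
          by_cases hx : x = N - (k + 1) <;>
            simp [hx, hspec, hW, PySem.Dict.get?_insert]
        · intro x
          by_cases hx : x = N - (k + 1) <;>
            simp [hx, hspec, hW, pvActOf, PySem.Dict.get?_insert]
    · have h2s' : ¬ (N - (k + 1)) * 2 ≤ N := by omega
      rw [if_neg h2s'] at hspec
      simp only [pvStepB, if_neg h2s, hgs, hw, Option.getD_some]
      constructor
      · intro x
        by_cases hx : x = N - (k + 1) <;> simp [hx, hspec, PySem.Dict.get?_insert]
      · intro x
        by_cases hx : x = N - (k + 1) <;> simp [hx, hspec, pvActOf, PySem.Dict.get?_insert]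
  constructor
  · intro x
    rw [hres.1 x]
    by_cases hx : x = N - (k + 1)
    · rw [if_pos hx, hx, if_neg (by omega), if_pos (by omega)]
    · rw [if_neg hx, inv.1 x]
      by_cases hxN : x = N
      · simp [hxN]
      · rw [if_neg hxN, if_neg hxN]
        by_cases hr : N - k ≤ x ∧ x < N
        · rw [if_pos hr, if_pos (by omega)]
        · rw [if_neg hr, if_neg (by omega)]
  · intro x
    rw [hres.2 x]
    by_cases hx : x = N - (k + 1)
    · rw [if_pos hx, hx, if_pos (by omega)]
    · rw [if_neg hx, inv.2 x]
      by_cases hr : N - k ≤ x ∧ x < N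
      · rw [if_pos hr, if_pos (by omega)]
      · rw [if_neg hr, if_neg (by omega)]

theorem pvFoldB (N tram walk : Int) : ∀ (k : Nat), (k : Int) ≤ N - 1 →
    pvInvB N tram walk (k : Int)
      ((PySem.List.pyRange 1 ((k : Int) + 1) 1).foldl (pvStepB N tram walk)
        (PySem.Dict.ofList [(N, (0 : Int))], PySem.Dict.empty)) := by
  intro k
  induction k with
  | zero =>
    intro _
    rw [PySem.List.pyRange_one_eq_nil (by omega)]
    constructor
    · intro x
      have hof : PySem.Dict.ofList [(N, (0 : Int))] = (PySem.Dict.empty).insert N 0 := rfl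
      simp only [List.foldl_nil, hof, PySem.Dict.get?_insert]
      by_cases hx : x = N <;> simp [hx, PySem.Dict.get?_empty]
    · intro x
      simp only [List.foldl_nil]
      simp [PySem.Dict.get?_empty]
  | succ k ih =>
    intro hk
    push_cast
    push_cast at hk
    rw [PySem.List.pyRange_one_succ_right (by omega : (1 : Int) ≤ (k : Int) + 1),
      List.foldl_append]
    simp only [List.foldl_cons, List.foldl_nil]
    exact pvStepB_preserve N tram walk (k : Int) _ (by omega) (by omega) (ih (by omega))

theorem pvWalkB_eq (N tram walk : Int) (ba : PySem.Dict Int (String × Int))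
    (hba : ∀ x, 1 ≤ x → x < N → PySem.Dict.get? ba x = pvActOf (pvSpec N tram walk x).2) :
    ∀ (f : Nat) (s : Int) (acc : List String), 1 ≤ s → s ≤ N → (N - s).toNat < f →
      pvWalkB ba N f s acc = acc ++ (pvSpec N tram walk s).2.map (fun e => e.1) := by
  intro f
  induction f with
  | zero => intro s acc h1 h2 hf; omega
  | succ f ih =>
    intro s acc h1 h2 hf
    by_cases hsN : s = N
    · simp [pvWalkB, hsN, pvSpec_base N tram walk N (by omega)]
    · obtain ⟨a, ns, c, hchain, hlt, hle⟩ := pvSpec_chain N tram walk s h1 (by omega)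
      simp only [pvWalkB, if_neg hsN, hba s h1 (by omega), hchain, pvActOf]
      rw [ih ns (acc ++ [a]) (by omega) hle (by omega)]
      simp

-- ========== predict equality ==========

theorem pvPredict_eq (N : Int) (weights : PySem.Dict String Int) :
    pvPredictA N weights = pvPredictB N weights := by
  by_cases hN : 1 ≤ N
  · -- both equal the pvSpec path from state 1
    have hA := pvRecA_correct N ((PySem.Dict.get? weights "tram").getD 0)
      ((PySem.Dict.get? weights "walk").getD 0) (N.toNat + 1) 1 PySem.Dict.empty
      (by omega) hN (by omega) (by intro k r h; simp [PySem.Dict.get?_empty] at h)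
    have hinv := pvFoldB N ((PySem.Dict.get? weights "tram").getD 0)
      ((PySem.Dict.get? weights "walk").getD 0) (N - 1).toNat (by omega)
    have hNk : ((N - 1).toNat : Int) + 1 = N := by omega
    rw [hNk] at hinv
    have hB := pvWalkB_eq N ((PySem.Dict.get? weights "tram").getD 0)
      ((PySem.Dict.get? weights "walk").getD 0) _
      (by
        intro x hx1 hx2
        rw [hinv.2 x, if_pos (by omega)])
      N.toNat 1 [] (by omega) hN (by omega)
    rw [pvPredictA, pvPredictB, hA.1, pvMkA, hB]
    simp [List.map_map, Function.comp]
  · -- N ≤ 0: A's DP finds no path (Python raises); B's table loop and walk are empty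
    have h2 : ¬ (2 ≤ N) := by omega
    have hN0 : N.toNat = 0 := by omega
    rw [pvPredictA, pvPredictB]
    rw [PySem.List.pyRange_one_eq_nil (by omega)]
    simp only [List.foldl_nil, hN0]
    simp [pvRecA, pvWalkB, show ¬ ((1:Int) = N) by omega, PySem.Dict.get?_empty, h2]

-- ===== VERDICT (by name: the statement is the Claim_ definition above) =====
theorem structuredPerceptron_spec : Claim_equal_structuredPerceptron := by
  intro examples _ _
  unfold Spec_structuredPerceptron
  have h : pvPredictA = pvPredictB := funext fun N => funext fun w => pvPredict_eq N w
  rw [structuredPerceptron, structuredPerceptron_alt, h]
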